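-- pv_equiv track=rewrite | github.com/scrapy/scrapy | scrapy/http/cookies.py | potential_domain_matches
-- ===== SOURCE A (Python) =====
-- from typing import (
--     TYPE_CHECKING,
--     Any,
--     Dict,
--     Iterator,
--     List,
--     Optional,
--     Sequence,
--     Tuple,
--     cast,
-- )
--
-- def potential_domain_matches(domain: str) -> List[str]:
--     """
--     Potential domain matches for a cookie
--
--     >>> potential_domain_matches('www.example.com')
--     ['www.example.com', 'example.com', '.www.example.com', '.example.com']
--
--     """
--     matches = [domain]
--     try:
--         start = domain.index(".") + 1
--         end = domain.rindex(".")
--         while start < end: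
--             matches.append(domain[start:])
--             start = domain.index(".", start) + 1
--     except ValueError:
--         pass
--     return matches + ["." + d for d in matches]
-- ===== SOURCE B (Python) =====
-- def potential_domain_matches(domain):
--     """Potential domain matches for a cookie.
--
--     Recursive label stripping: partition off the leading label at each step;
--     a stripped suffix is kept iff it still contains a dot beyond its first
--     character (i.e. it still has an interior dot to strip later).
--     """
--
--     def tails(s):
--         _, sep, rest = s.partition(".")
--         if not sep:
--             return []
--         keep = [rest] if "." in rest[1:] else []
--         return keep + tails(rest)
--
--     matches = [domain] + tails(domain)
--     return matches + ["." + m for m in matches]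
-- ===== Notes on version B (the rewrite author's own statement) =====
-- stated objective: alternative
-- what changed: Replaces A's index/rindex pointer loop with start<end bound checks by a recursive partition-based label stripper that keeps each stripped suffix iff it still contains an interior dot, needing no position arithmetic and no rindex/try-except.
import Mathlib
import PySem

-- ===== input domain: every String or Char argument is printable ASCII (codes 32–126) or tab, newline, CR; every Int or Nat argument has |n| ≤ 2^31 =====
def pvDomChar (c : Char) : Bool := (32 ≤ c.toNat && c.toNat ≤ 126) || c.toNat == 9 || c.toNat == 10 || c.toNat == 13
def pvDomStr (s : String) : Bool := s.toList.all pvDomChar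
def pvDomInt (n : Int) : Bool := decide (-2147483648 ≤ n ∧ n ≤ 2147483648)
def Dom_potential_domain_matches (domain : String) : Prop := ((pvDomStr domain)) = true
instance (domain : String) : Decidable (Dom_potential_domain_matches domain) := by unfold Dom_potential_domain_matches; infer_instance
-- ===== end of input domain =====

-- B replaces A's index/rindex pointer loop (start < end bound checks, try/except) by a recursive
-- partition-based label stripper keeping each suffix iff it still has an interior dot (objective: alternative).

-- ===== PORT A =====
-- the while loop, with a fuel guard only to make the same computation total
-- (start strictly increases and the loop runs only while start < end ≤ len, so the fuel never runs out)
def pvALoop (domain : String) (endd : Int) : Nat → Int → List String → List String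
  | 0, _, ms => ms
  | fuel+1, start, ms =>
    if start < endd then
      pvALoop domain endd fuel (PySem.Str.findFrom domain "." start none + 1)
        (ms ++ [PySem.Str.slice domain (some start) none])
    else ms

def potential_domain_matches (domain : String) : List String :=
  let ms := [domain]
  -- domain.index(".") raises ValueError (→ except: pass) iff find = -1;
  -- when it succeeds, rindex and the in-loop index(".", start) always succeed too
  let f := PySem.Str.find domain "."
  let ms :=
    if f = -1 then ms
    else pvALoop domain (PySem.Str.rfind domain ".") (domain.toList.length + 1) (f + 1) ms
  ms ++ ms.map (fun d => "." ++ d)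

-- ===== PORT B =====
-- tails(s): partition off the leading label; keep the remainder iff "." in rest[1:]; recurse on rest.
-- The fuel guard only makes the same recursion total (rest is a strict suffix, so fuel = len+1 suffices).
def pvBTails : Nat → List Char → List String
  | 0, _ => []
  | fuel+1, s =>
    let f := PySem.Chars.find s ['.']           -- s.partition("."): sep is empty iff no dot
    if f = -1 then []
    else
      let rest := PySem.List.slice s (some (f + 1)) none
      (if PySem.Chars.isIn ['.'] (PySem.List.slice rest (some 1) none)
        then [String.ofList rest] else []) ++ pvBTails fuel rest

def potential_domain_matches_alt (domain : String) : List String :=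
  let ms := domain :: pvBTails (domain.toList.length + 1) domain.toList
  ms ++ ms.map (fun m => "." ++ m)

-- ===== PRECONDITION & SPEC =====
def Spec_potential_domain_matches (domain : String) (out : List String) : Prop := out = potential_domain_matches_alt domain
instance (domain : String) (out : List String) : Decidable (Spec_potential_domain_matches domain out) := by unfold Spec_potential_domain_matches; infer_instance

-- ===== CLAIM (what is proved, stated in full; the proofs are below) =====
def Claim_equal_potential_domain_matches : Prop := ∀ (domain : String), Dom_potential_domain_matches domain → Spec_potential_domain_matches domain (potential_domain_matches domain)

-- ===== LEMMAS AND PROOFS =====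

-- dot positions of s, in increasing order
def pvDots (s : List Char) : List Nat :=
  (List.range s.length).filter (fun i => decide (s[i]? = some '.'))

lemma pvDots_mem {s : List Char} {d : Nat} : d ∈ pvDots s ↔ d < s.length ∧ s[d]? = some '.' := by
  simp [pvDots, List.mem_filter, List.mem_range]

lemma pvDots_sorted (s : List Char) : (pvDots s).Pairwise (· < ·) :=
  List.Pairwise.filter _ List.pairwise_lt_range

lemma pvDots_cons (x : Char) (t : List Char) :
    pvDots (x :: t) = (if x = '.' then [0] else []) ++ (pvDots t).map (· + 1) := by
  unfold pvDots
  rw [List.length_cons, List.range_succ_eq_map, List.filter_cons, List.filter_map]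
  have h1 : (fun i => decide ((x :: t)[i]? = some '.')) ∘ Nat.succ
      = fun i => decide (t[i]? = some '.') := by funext i; simp
  have h2 : (Nat.succ = fun n => n + 1) := by funext n; rfl
  rw [h1, h2]
  by_cases hx : x = '.' <;> simp [hx]

lemma pvPrefixDot (l : List Char) : ['.'].isPrefixOf l = (decide (l.head? = some '.')) := by
  cases l with
  | nil => simp [List.isPrefixOf]
  | cons h t =>
    by_cases hh : h = '.'
    · simp [List.isPrefixOf, hh]
    · simp [List.isPrefixOf, hh]
      exact fun h' => hh h'.symm

lemma pvFindGo (l : List Char) : ∀ k : Nat,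
    PySem.Chars.find.go ['.'] l k = ((pvDots l).head?.elim (-1) (fun j : Nat => ((k + j : Nat) : Int))) := by
  induction l with
  | nil => intro k; simp [PySem.Chars.find.go, pvDots]
  | cons x t ih =>
    intro k
    rw [PySem.Chars.find.go, pvDots_cons, pvPrefixDot]
    by_cases hx : x = '.'
    · simp [hx]
    · simp only [hx, if_false, decide_eq_true_eq]
      rw [if_neg (by simp [hx]), ih (k+1)]
      cases h : (pvDots t).head? with
      | none => simp [h]
      | some j => simp [h, List.head?_map]; omega

lemma pvFind (s : List Char) :
    PySem.Chars.find s ['.'] = ((pvDots s).head?.elim (-1) (fun j : Nat => (j : Int))) := by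
  have : PySem.Chars.find s ['.'] = PySem.Chars.find.go ['.'] s 0 := rfl
  rw [this, pvFindGo]
  cases (pvDots s).head? <;> simp

lemma pvRfindGo (s : List Char) : ∀ n : Nat,
    PySem.Chars.rfind.go s ['.'] n
      = (((List.range (n+1)).filter (fun i => decide (s[i]? = some '.'))).getLast?.elim (-1) (fun j : Nat => (j : Int))) := by
  intro n
  induction n with
  | zero =>
    rw [PySem.Chars.rfind.go, pvPrefixDot]
    rw [List.head?_eq_getElem?]
    by_cases h : s[0]? = some '.' <;> simp [h, List.range_succ, List.filter]
  | succ j ih =>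
    rw [PySem.Chars.rfind.go]
    simp only [pvPrefixDot]
    have hd : (List.drop (j+1) s).head? = s[j+1]? := by
      rw [List.head?_eq_getElem?, List.getElem?_drop]
    rw [hd]
    have hr : List.range (j+1+1) = List.range (j+1) ++ [j+1] := List.range_succ
    rw [hr, List.filter_append]
    by_cases h : s[j+1]? = some '.'
    · simp [h]
    · simp [h, ih]

lemma pvRfind (s : List Char) :
    PySem.Chars.rfind s ['.'] = ((pvDots s).getLast?.elim (-1) (fun j : Nat => (j : Int))) := by
  have h1 : PySem.Chars.rfind s ['.'] = PySem.Chars.rfind.go s ['.'] s.length := rfl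
  rw [h1]
  cases hn : s.length with
  | zero =>
    have hs : s = [] := List.length_eq_zero_iff.mp hn
    subst hs
    rw [PySem.Chars.rfind.go, pvPrefixDot]
    simp [pvDots]
  | succ n =>
    rw [pvRfindGo]
    have : List.range (n+1+1) = List.range (n+1) ++ [n+1] := List.range_succ
    rw [this, List.filter_append]
    have hnone : s[n+1]? = none := by rw [List.getElem?_eq_none_iff]; omega
    simp [pvDots, hn]

lemma pvDots_drop (s : List Char) (k : Nat) (hk : k ≤ s.length) :
    (pvDots s).filter (fun d => decide (k ≤ d)) = (pvDots (s.drop k)).map (· + k) := by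
  unfold pvDots
  rw [List.filter_filter]
  rw [show (fun d => decide (k ≤ d) && decide (s[d]? = some '.'))
      = (fun d => decide (s[d]? = some '.') && decide (k ≤ d)) from by
    funext d; rw [Bool.and_comm]]
  have hlen : s.length = k + (s.length - k) := by omega
  rw [hlen, List.range_add, List.filter_append, List.filter_map]
  have h1 : (List.range k).filter (fun i => decide (s[i]? = some '.') && decide (k ≤ i)) = [] := by
    rw [List.filter_eq_nil_iff]; intro a ha; simp [List.mem_range] at ha ⊢; omega
  have h2 : ((fun i => decide (s[i]? = some '.') && decide (k ≤ i)) ∘ fun x => k + x)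
      = fun i => decide ((List.drop k s)[i]? = some '.') := by
    funext i; simp [List.getElem?_drop]
  rw [h1, h2]
  have h3 : (fun x => k + x) = (fun x => x + k) := by funext x; omega
  rw [h3, List.length_drop]
  simp

lemma pvFindFrom (s : List Char) (k : Nat) (hk : k ≤ s.length) :
    PySem.Chars.findFrom s ['.'] (k : Int) none
      = (((pvDots s).filter (fun d => decide (k ≤ d))).head?.elim (-1) (fun j : Nat => (j : Int))) := by
  rw [PySem.Chars.findFrom_natCast s ['.'] k hk, pvFind, pvDots_drop s k hk]
  cases h : (pvDots (s.drop k)).head? with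
  | none => simp [h, List.head?_map]
  | some j => simp [h, List.head?_map]; omega

lemma pvHeadLeast {l : List Nat} (hs : l.Pairwise (· < ·)) {p : Nat → Bool} {m : Nat}
    (h : (l.filter p).head? = some m) : m ∈ l ∧ p m = true ∧ ∀ b ∈ l, p b = true → m ≤ b := by
  obtain ⟨t, ht⟩ := List.head?_eq_some_iff.mp h
  have hmem : m ∈ l.filter p := by rw [ht]; exact List.mem_cons_self
  refine ⟨(List.mem_filter.mp hmem).1, (List.mem_filter.mp hmem).2, ?_⟩
  intro b hb hpb
  have hbf : b ∈ l.filter p := List.mem_filter.mpr ⟨hb, hpb⟩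
  rw [ht] at hbf
  rcases List.mem_cons.mp hbf with h1 | h1
  · omega
  · have hpw := hs.filter p
    rw [ht] at hpw
    have := (List.pairwise_cons.mp hpw).1 b h1
    omega

lemma pvFilterCons {l : List Nat} (hs : l.Pairwise (· < ·)) {a : Nat} {p q : Nat → Bool}
    (ha : a ∈ l) (hpa : p a = true)
    (hlow : ∀ b ∈ l, b < a → p b = false)
    (hhigh : ∀ b ∈ l, a < b → p b = q b)
    (hqlow : ∀ b ∈ l, b ≤ a → q b = false) :
    l.filter p = a :: l.filter q := by
  induction l with
  | nil => simp at ha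
  | cons x t ih =>
    have hpw := List.pairwise_cons.mp hs
    by_cases hxa : x = a
    · subst hxa
      rw [List.filter_cons_of_pos hpa, List.filter_cons_of_neg (by simp [hqlow x List.mem_cons_self (le_refl x)])]
      congr 1
      exact List.filter_congr (fun b hb => hhigh b (List.mem_cons_of_mem _ hb) (hpw.1 b hb))
    · have hat : a ∈ t := by
        rcases List.mem_cons.mp ha with h | h
        · omega
        · exact h
      have hxlt : x < a := hpw.1 a hat
      rw [List.filter_cons_of_neg (by simp [hlow x List.mem_cons_self hxlt]),
          List.filter_cons_of_neg (by simp [hqlow x List.mem_cons_self (le_of_lt hxlt)])]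
      exact ih hpw.2 hat
        (fun b hb => hlow b (List.mem_cons_of_mem _ hb))
        (fun b hb => hhigh b (List.mem_cons_of_mem _ hb))
        (fun b hb => hqlow b (List.mem_cons_of_mem _ hb))

lemma pvMax_of_getLast {l : List Nat} (hs : l.Pairwise (· < ·)) {e : Nat}
    (h : l.getLast? = some e) : ∀ d ∈ l, d ≤ e := by
  obtain ⟨l', hl⟩ := List.getLast?_eq_some_iff.mp h
  subst hl
  intro d hd
  rcases List.mem_append.mp hd with h1 | h1
  · have := List.pairwise_append.mp hs
    have := this.2.2 d h1 e List.mem_cons_self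
    omega
  · simp at h1; omega

-- the loop invariant: from start k (where k-1 is a dot), A's loop appends exactly the
-- suffixes after each dot d with k ≤ d+1 < e
lemma pvLoop (domain : String) (e : Nat) (he : (pvDots domain.toList).getLast? = some e) :
    ∀ fuel k ms, e + 1 - k < fuel → 1 ≤ k → (k - 1) ∈ pvDots domain.toList →
      pvALoop domain (e : Int) fuel (k : Int) ms
        = ms ++ ((pvDots domain.toList).filter
            (fun d => decide (k ≤ d + 1) && decide (d + 1 < e))).map
            (fun d : Nat => PySem.Str.slice domain (some ((d : Int) + 1)) none) := by
  intro fuel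
  induction fuel with
  | zero => intro k ms hf; omega
  | succ n ih =>
    intro k ms hf hk1 hkd
    set s := domain.toList with hsdef
    by_cases hke : k < e
    · rw [pvALoop, if_pos (by exact_mod_cast hke)]
      have hemem : e ∈ pvDots s := by
        obtain ⟨l', hl⟩ := List.getLast?_eq_some_iff.mp he
        rw [hl]; simp
      have helen : e < s.length := (pvDots_mem.mp hemem).1
      have hks : k ≤ s.length := by omega
      have hffrom : PySem.Str.findFrom domain "." (k : Int) none
          = PySem.Chars.findFrom s ['.'] (k : Int) none := by
        simp [hsdef]
      -- the filter (k ≤ ·) of the dots is nonempty (e is in it)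
      have hne : ((pvDots s).filter (fun d => decide (k ≤ d))).head? ≠ none := by
        intro hcon
        rw [List.head?_eq_none_iff, List.filter_eq_nil_iff] at hcon
        exact absurd (by simpa using hcon e hemem) (by omega)
      obtain ⟨m, hm⟩ : ∃ m, ((pvDots s).filter (fun d => decide (k ≤ d))).head? = some m := by
        cases h : ((pvDots s).filter (fun d => decide (k ≤ d))).head? with
        | none => exact absurd h hne
        | some m => exact ⟨m, rfl⟩
      obtain ⟨hmmem, hmk, hmleast⟩ := pvHeadLeast (pvDots_sorted s) hm
      simp only [decide_eq_true_eq] at hmk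
      have hme : m ≤ e := pvMax_of_getLast (pvDots_sorted s) he m hmmem
      rw [hffrom, pvFindFrom s k hks, hm]
      have hcast : (Option.some m).elim (-1 : Int) (fun j : Nat => (j : Int)) + 1 = ((m + 1 : Nat) : Int) := by
        simp
      rw [hcast, ih (m+1) (ms ++ [PySem.Str.slice domain (some (k : Int)) none])
            (by omega) (by omega) (by simpa using hmmem)]
      have hsplit : (pvDots s).filter (fun d => decide (k ≤ d + 1) && decide (d + 1 < e))
          = (k - 1) :: (pvDots s).filter (fun d => decide (m + 1 ≤ d + 1) && decide (d + 1 < e)) := by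
        apply pvFilterCons (pvDots_sorted s) hkd
        · simp only [Bool.and_eq_true, decide_eq_true_eq]; omega
        · intro b _ hb; simp only [Bool.and_eq_false_iff, decide_eq_false_iff_not]; omega
        · intro b hb hab
          have hkb : k ≤ b := by omega
          have hmb : m ≤ b := hmleast b hb (by simpa using hkb)
          have h1 : decide (k ≤ b + 1) = true := by simp; omega
          have h2 : decide (m + 1 ≤ b + 1) = true := by simp; omega
          rw [h1, h2]
        · intro b _ hb; simp only [Bool.and_eq_false_iff, decide_eq_false_iff_not]; omega
      rw [hsplit, List.map_cons]
      have hfk : ((k - 1 : Nat) : Int) + 1 = (k : Int) := by omega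
      rw [hfk]
      simp
    · rw [pvALoop, if_neg (by exact_mod_cast hke)]
      have : ((pvDots s).filter (fun d => decide (k ≤ d + 1) && decide (d + 1 < e))) = [] := by
        rw [List.filter_eq_nil_iff]
        intro d hd
        simp only [Bool.and_eq_true, decide_eq_true_eq, not_and]
        omega
      rw [this]; simp

-- B-side lemmas ----------------------------------------------------------

lemma pvIsInDot (l : List Char) : PySem.Chars.isIn ['.'] l = decide ('.' ∈ l) := by
  by_cases h : '.' ∈ l
  · simp only [h, decide_true]
    exact (PySem.Chars.isIn_iff_infix _ _).mpr ((List.singleton_infix_iff '.' l).mpr h)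
  · simp only [h, decide_false]
    exact (PySem.Chars.isIn_eq_false_iff _ _).mpr (fun hc => h ((List.singleton_infix_iff '.' l).mp hc))

lemma pvMemDrop (s : List Char) (k : Nat) : '.' ∈ s.drop k ↔ ∃ d ∈ pvDots s, k ≤ d := by
  constructor
  · intro h
    obtain ⟨n, hn⟩ := List.mem_iff_getElem?.mp h
    rw [List.getElem?_drop] at hn
    obtain ⟨hlt, -⟩ := List.getElem?_eq_some_iff.mp hn
    exact ⟨k + n, pvDots_mem.mpr ⟨hlt, hn⟩, by omega⟩
  · rintro ⟨d, hd, hkd⟩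
    obtain ⟨hdl, hds⟩ := pvDots_mem.mp hd
    refine List.mem_iff_getElem?.mpr ⟨d - k, ?_⟩
    rw [List.getElem?_drop, show k + (d - k) = d from by omega]
    exact hds

-- the tail of the dot list is the dots of the rest, shifted
lemma pvDots_tail {s : List Char} {h : Nat} {t : List Nat} (hds : pvDots s = h :: t) :
    t = (pvDots (s.drop (h+1))).map (· + (h+1)) := by
  have hh : h ∈ pvDots s := by rw [hds]; exact List.mem_cons_self
  have hlen : h < s.length := (pvDots_mem.mp hh).1
  have := pvDots_drop s (h+1) (by omega)
  rw [hds] at this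
  rw [← this, List.filter_cons_of_neg (by simp)]
  symm
  apply List.filter_eq_self.mpr
  intro b hb
  have hsorted := pvDots_sorted s
  rw [hds] at hsorted
  have := (List.pairwise_cons.mp hsorted).1 b hb
  simp; omega

-- B's recursion computes: for each dot d, keep the suffix after it iff a dot remains past d+1
lemma pvBTails_eq : ∀ (fuel : Nat) (s : List Char), s.length < fuel →
    pvBTails fuel s
      = ((pvDots s).filter (fun d => decide ('.' ∈ s.drop (d+2)))).map
          (fun d => String.ofList (s.drop (d+1))) := by
  intro fuel
  induction fuel with
  | zero => intro s hf; omega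
  | succ n ih =>
    intro s hf
    rw [pvBTails, pvFind]
    cases hds : pvDots s with
    | nil => simp
    | cons h t =>
      have hh : h ∈ pvDots s := by rw [hds]; exact List.mem_cons_self
      have hlen : h < s.length := (pvDots_mem.mp hh).1
      simp only [List.head?_cons, Option.elim_some]
      rw [if_neg (by simp)]
      have hcast : ((h : Int) + 1) = ((h + 1 : Nat) : Int) := by push_cast; ring
      rw [hcast, PySem.List.slice_from_natCast]
      have hone : (1 : Int) = ((1 : Nat) : Int) := rfl
      rw [hone, PySem.List.slice_from_natCast, List.drop_drop]
      rw [ih (s.drop (h+1)) (by rw [List.length_drop]; omega)]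
      rw [List.filter_cons]
      have ht : t = (pvDots (s.drop (h+1))).map (· + (h+1)) := pvDots_tail hds
      rw [pvIsInDot]
      have htail : ((pvDots (s.drop (h+1))).filter
            (fun d => decide ('.' ∈ (s.drop (h+1)).drop (d+2)))).map
            (fun d => String.ofList ((s.drop (h+1)).drop (d+1)))
          = (t.filter (fun d => decide ('.' ∈ s.drop (d+2)))).map
            (fun d => String.ofList (s.drop (d+1))) := by
        rw [ht, List.filter_map, List.map_map]
        have hp : ((fun d => decide ('.' ∈ s.drop (d+2))) ∘ (· + (h+1)))
            = fun d => decide ('.' ∈ (s.drop (h+1)).drop (d+2)) := by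
          funext d
          simp only [Function.comp, List.drop_drop]
          rw [show h + 1 + (d + 2) = d + (h+1) + 2 from by omega]
        have hm : ((fun d => String.ofList (s.drop (d+1))) ∘ (· + (h+1)))
            = fun d => String.ofList ((s.drop (h+1)).drop (d+1)) := by
          funext d
          simp only [Function.comp, List.drop_drop]
          rw [show h + 1 + (d + 1) = d + (h+1) + 1 from by omega]
        rw [hp, hm]
      rw [htail, show h + 1 + 1 = h + 2 from by omega]
      by_cases hcond : '.' ∈ s.drop (h + 2)
      · rw [if_pos (by simpa using hcond), if_pos (by simpa using hcond), List.map_cons]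
        rfl
      · rw [if_neg (by simpa using hcond), if_neg (by simpa using hcond), List.nil_append]

-- ===== VERDICT (by name: the statement is the Claim_ definition above) =====
-- the Python slice s[d+1:] as a String, in drop form
lemma pvSliceFrom (s : String) (d : Nat) :
    PySem.Str.slice s (some ((d : Int) + 1)) none = String.ofList (s.toList.drop (d+1)) := by
  have h : ((d : Int) + 1) = ((d + 1 : Nat) : Int) := by push_cast; ring
  rw [PySem.Str.slice, h, PySem.Chars.slice, PySem.List.slice_from_natCast]

theorem potential_domain_matches_spec : Claim_equal_potential_domain_matches := by
  intro domain _
  unfold Spec_potential_domain_matches potential_domain_matches potential_domain_matches_alt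
  simp only [PySem.Str.find_eq, PySem.Str.rfind_eq]
  have htolist : ".".toList = ['.'] := rfl
  rw [htolist, pvFind, pvRfind,
      pvBTails_eq (domain.toList.length + 1) domain.toList (by omega)]
  cases hds : pvDots domain.toList with
  | nil => simp
  | cons h t =>
    obtain ⟨e, he⟩ : ∃ e, (h :: t).getLast? = some e :=
      ⟨(h :: t).getLast (by simp), List.getLast?_eq_some_getLast (by simp)⟩
    have he' : (pvDots domain.toList).getLast? = some e := by rw [hds]; exact he
    have hemem : e ∈ pvDots domain.toList := by
      obtain ⟨l', hl⟩ := List.getLast?_eq_some_iff.mp he'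
      rw [hl]; simp
    have helen : e < domain.toList.length := (pvDots_mem.mp hemem).1
    have hhmem : h ∈ pvDots domain.toList := by rw [hds]; exact List.mem_cons_self
    have hnotneg : ¬ ((Option.some h).elim (-1 : Int) (fun j : Nat => (j : Int)) = -1) := by simp
    rw [List.head?_cons, he, if_neg hnotneg]
    have hstart : (Option.some h).elim (-1 : Int) (fun j : Nat => (j : Int)) + 1 = ((h + 1 : Nat) : Int) := by simp
    have helim : (Option.some e).elim (-1 : Int) (fun j : Nat => (j : Int)) = (e : Int) := rfl
    rw [hstart, helim, pvLoop domain e he' (domain.toList.length + 1) (h + 1) [domain]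
      (by omega) (by omega) (by simpa using hhmem)]
    -- A's filter condition simplifies: every dot d has h ≤ d, so h + 1 ≤ d + 1 is vacuous;
    -- and d + 1 < e is exactly "a dot remains beyond position d + 1"
    have hcongr : (pvDots domain.toList).filter (fun d => decide (h + 1 ≤ d + 1) && decide (d + 1 < e))
        = (pvDots domain.toList).filter (fun d => decide ('.' ∈ domain.toList.drop (d+2))) := by
      apply List.filter_congr
      intro d hd
      have hhd : h ≤ d := by
        rw [hds] at hd
        rcases List.mem_cons.mp hd with h1 | h1
        · omega
        · have hsorted := pvDots_sorted domain.toList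
          rw [hds] at hsorted
          exact le_of_lt ((List.pairwise_cons.mp hsorted).1 d h1)
      have h1 : decide (h + 1 ≤ d + 1) = true := by simp; omega
      rw [h1, Bool.true_and]
      by_cases hde : d + 1 < e
      · have : '.' ∈ domain.toList.drop (d+2) :=
          (pvMemDrop _ _).mpr ⟨e, hemem, by omega⟩
        simp [hde, this]
      · have : ¬ '.' ∈ domain.toList.drop (d+2) := by
          intro hc
          obtain ⟨d', hd', hdd'⟩ := (pvMemDrop _ _).mp hc
          have := pvMax_of_getLast (pvDots_sorted _) he' d' hd'
          omega
        simp [hde, this]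
    rw [hcongr, List.map_congr_left (fun d _ => pvSliceFrom domain d), hds]
    simp
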